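-- pv_equiv track=rewrite | github.com/bas27/urban-base | module_2/module_2_hard.py | oldQues
-- ===== SOURCE A (Python) =====
-- def unicNumber(val):
--     result = ''
--     for j in range(int(val // 2)):
--         num1 = j + 1
--         num2 = val - num1
--         if num1 != num2 and (num1 != 0 and num2 != 0):
--             result += str(num1) + str(num2)
--     return result
--
-- def oldQues(n):
--     my_list = []
--     str_devider = ''
--     for i in range(1, n+1):
--         if n % i == 0 and i > 2 and i != n:
--             my_list.append(i)
--     if my_list:
--         for i in my_list:
--             str_devider += unicNumber(i)
--     return  str_devider + unicNumber(n)
-- ===== SOURCE B (Python) =====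
-- def unicNumber(val):
--     result = ''
--     for j in range(int(val // 2)):
--         num1 = j + 1
--         num2 = val - num1
--         if num1 != num2 and (num1 != 0 and num2 != 0):
--             result += str(num1) + str(num2)
--     return result
--
-- def oldQues(n):
--     result = ''
--     if n > 0:
--         divs = set()
--         i = 1
--         while i * i <= n:
--             if n % i == 0:
--                 divs.add(i)
--                 divs.add(n // i)
--             i += 1
--         for d in sorted(divs):
--             if 2 < d < n:
--                 result += unicNumber(d)
--     return result + unicNumber(n)
-- ===== Notes on version B (the rewrite author's own statement) =====
-- stated objective: alternative
-- what changed: Replaces the full 1..n divisor scan with a sqrt(n) paired-divisor enumeration into a set, sorted ascending before the output pass, and drops the intermediate list/emptiness check; string building (unicNumber) is unchanged and dominates the cost.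
import Mathlib
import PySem

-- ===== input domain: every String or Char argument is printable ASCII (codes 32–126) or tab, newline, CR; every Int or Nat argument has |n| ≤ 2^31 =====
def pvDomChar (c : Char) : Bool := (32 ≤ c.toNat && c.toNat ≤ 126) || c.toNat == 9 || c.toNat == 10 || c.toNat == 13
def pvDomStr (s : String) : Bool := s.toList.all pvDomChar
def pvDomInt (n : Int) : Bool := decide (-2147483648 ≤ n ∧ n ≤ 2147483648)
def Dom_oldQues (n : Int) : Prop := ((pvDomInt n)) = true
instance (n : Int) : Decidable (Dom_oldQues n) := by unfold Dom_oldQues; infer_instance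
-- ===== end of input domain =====

-- B replaces A's full 1..n divisor scan with a √n paired-divisor enumeration into a set,
-- sorted ascending before the output pass (objective: alternative algorithm; string building unchanged).

-- ===== PORT A =====
-- helper shared verbatim by A and B (Source B keeps unicNumber unchanged)
def unicNumber (val : Int) : String :=
  (PySem.List.pyRange 0 (PySem.Int.floordiv val 2) 1).foldl
    (fun result j =>
      let num1 := j + 1
      let num2 := val - num1
      if num1 ≠ num2 ∧ (num1 ≠ 0 ∧ num2 ≠ 0) then
        result ++ (PySem.Int.toStr num1 ++ PySem.Int.toStr num2)
      else result) ""

def oldQues (n : Int) : String :=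
  let my_list : List Int :=
    (PySem.List.pyRange 1 (n + 1) 1).foldl
      (fun acc i => if PySem.Int.mod n i = 0 ∧ i > 2 ∧ i ≠ n then acc ++ [i] else acc) []
  let str_devider : String :=
    if my_list ≠ [] then my_list.foldl (fun s i => s ++ unicNumber i) "" else ""
  str_devider ++ unicNumber n

-- ===== PORT B =====
-- termination fact for the while loop: i*i ≤ n forces i ≤ n
theorem pv_le_of_sq_le (n i : Int) (h : i * i ≤ n) : i ≤ n := by
  have h0 : (0 : Int) ≤ n := le_trans (mul_self_nonneg i) h
  by_cases h1 : 1 ≤ i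
  · nlinarith
  · omega

-- while i*i <= n: collect i and n//i when i divides n
def collectDivs (n : Int) (i : Int) (divs : PySem.Set Int) : PySem.Set Int :=
  if h : i * i ≤ n then
    collectDivs n (i + 1)
      (if PySem.Int.mod n i = 0 then
        PySem.Set.add (PySem.Set.add divs i) (PySem.Int.floordiv n i)
      else divs)
  else divs
termination_by (n + 1 - i).toNat
decreasing_by
  have hi : i ≤ n := pv_le_of_sq_le n i h
  omega

def oldQues_alt (n : Int) : String :=
  let result : String :=
    if n > 0 then
      let divs := collectDivs n 1 PySem.Set.empty
      (PySem.List.sorted divs (fun x => x) false).foldl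
        (fun r d => if 2 < d ∧ d < n then r ++ unicNumber d else r) ""
    else ""
  result ++ unicNumber n

-- ===== PRECONDITION & SPEC =====
def Spec_oldQues (n : Int) (out : String) : Prop := out = oldQues_alt n
instance (n : Int) (out : String) : Decidable (Spec_oldQues n out) := by unfold Spec_oldQues; infer_instance

-- ===== CLAIM (what is proved, stated in full; the proofs are below) =====
def Claim_equal_oldQues : Prop := ∀ (n : Int), Dom_oldQues n → Spec_oldQues n (oldQues n)

-- ===== LEMMAS AND PROOFS =====

-- membership in the √n enumeration
theorem mem_collectDivs (n : Int) (d : Int) :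
    ∀ (k : Nat) (i : Int) (s : PySem.Set Int), 1 ≤ i → (n + 1 - i).toNat = k →
      (d ∈ collectDivs n i s ↔
        d ∈ s ∨ ∃ j, i ≤ j ∧ j * j ≤ n ∧ PySem.Int.mod n j = 0 ∧
          (d = j ∨ d = PySem.Int.floordiv n j)) := by
  intro k
  induction k with
  | zero =>
    intro i s hi hk
    rw [collectDivs]
    have hno : ¬ i * i ≤ n := by
      intro h
      have := pv_le_of_sq_le n i h
      omega
    simp only [hno, dite_false]
    constructor
    · exact Or.inl
    · rintro (h | ⟨j, hij, hjj, _⟩)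
      · exact h
      · exfalso
        have h2 : i * i ≤ j * j := mul_le_mul hij hij (by omega) (by omega)
        have := pv_le_of_sq_le n i (le_trans h2 hjj)
        omega
  | succ k ih =>
    intro i s hi hk
    rw [collectDivs]
    by_cases h : i * i ≤ n
    · have hn : (0 : Int) ≤ n := le_trans (mul_self_nonneg i) h
      have hin : i ≤ n := pv_le_of_sq_le n i h
      simp only [h, dite_true]
      rw [ih (i + 1) _ (by omega) (by omega)]
      by_cases hd : PySem.Int.mod n i = 0
      · simp only [hd, if_true, PySem.Set.mem_add]
        constructor
        · rintro (((hs | rfl) | rfl) | ⟨j, hj1, hj2, hj3, hj4⟩)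
          · exact Or.inl hs
          · exact Or.inr ⟨d, le_refl _, h, hd, Or.inl rfl⟩
          · exact Or.inr ⟨i, le_refl _, h, hd, Or.inr rfl⟩
          · exact Or.inr ⟨j, by omega, hj2, hj3, hj4⟩
        · rintro (hs | ⟨j, hj1, hj2, hj3, hj4⟩)
          · exact Or.inl (Or.inl (Or.inl hs))
          · rcases eq_or_lt_of_le hj1 with rfl | hlt
            · rcases hj4 with rfl | rfl
              · exact Or.inl (Or.inl (Or.inr rfl))
              · exact Or.inl (Or.inr rfl)
            · exact Or.inr ⟨j, by omega, hj2, hj3, hj4⟩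
      · simp only [hd, if_false]
        constructor
        · rintro (hs | ⟨j, hj1, hj2, hj3, hj4⟩)
          · exact Or.inl hs
          · exact Or.inr ⟨j, by omega, hj2, hj3, hj4⟩
        · rintro (hs | ⟨j, hj1, hj2, hj3, hj4⟩)
          · exact Or.inl hs
          · rcases eq_or_lt_of_le hj1 with rfl | hlt
            · exact absurd hj3 hd
            · exact Or.inr ⟨j, by omega, hj2, hj3, hj4⟩
    · simp only [h, dite_false]
      constructor
      · exact Or.inl
      · rintro (hs | ⟨j, hj1, hj2, _⟩)
        · exact hs
        · exfalso
          have h2 : i * i ≤ j * j := mul_le_mul hj1 hj1 (by omega) (by omega)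
          exact h (le_trans h2 hj2)

-- for n ≥ 1 the enumerated set is exactly the divisors of n in [1, n]
theorem mem_collectDivs_one (n : Int) (hn : 1 ≤ n) (d : Int) :
    d ∈ collectDivs n 1 PySem.Set.empty ↔ d ∣ n ∧ 1 ≤ d ∧ d ≤ n := by
  rw [mem_collectDivs n d (n + 1 - 1).toNat 1 PySem.Set.empty le_rfl rfl]
  simp only [PySem.Set.empty, List.not_mem_nil, false_or]
  constructor
  · rintro ⟨j, hj1, hj2, hj3, hj4⟩
    have hjdvd : j ∣ n := (PySem.Int.mod_eq_zero_iff_dvd n j).mp hj3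
    rcases hj4 with rfl | rfl
    · exact ⟨hjdvd, hj1, by nlinarith⟩
    · obtain ⟨k, hk⟩ := hjdvd
      have hjpos : 0 < j := hj1
      have hfd : PySem.Int.floordiv n j = k := by
        rw [PySem.Int.floordiv_eq_ediv_of_pos hjpos, hk, Int.mul_ediv_cancel_left k (by omega)]
      rw [hfd]
      have hk1 : 1 ≤ k := by nlinarith
      refine ⟨⟨j, by rw [hk]; ring⟩, hk1, ?_⟩
      · nlinarith
  · rintro ⟨hdvd, hd1, hdn⟩
    obtain ⟨k, hk⟩ := hdvd
    have hk1 : 1 ≤ k := by nlinarith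
    by_cases hsq : d * d ≤ n
    · exact ⟨d, hd1, hsq, (PySem.Int.mod_eq_zero_iff_dvd n d).mpr ⟨k, hk⟩, Or.inl rfl⟩
    · refine ⟨k, hk1, ?_, (PySem.Int.mod_eq_zero_iff_dvd n k).mpr ⟨d, by rw [hk]; ring⟩, Or.inr ?_⟩
      · nlinarith
      · rw [PySem.Int.floordiv_eq_ediv_of_pos (by omega), hk, mul_comm d k,
          Int.mul_ediv_cancel_left d (by omega)]

theorem nodup_collectDivs (n : Int) :
    ∀ (k : Nat) (i : Int) (s : PySem.Set Int), s.Nodup → (n + 1 - i).toNat = k →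
      (collectDivs n i s).Nodup := by
  intro k
  induction k with
  | zero =>
    intro i s hs hk
    rw [collectDivs]
    by_cases h : i * i ≤ n
    · exfalso
      have hn : (0 : Int) ≤ n := le_trans (mul_self_nonneg i) h
      have := pv_le_of_sq_le n i h
      omega
    · simpa [h] using hs
  | succ k ih =>
    intro i s hs hk
    rw [collectDivs]
    by_cases h : i * i ≤ n
    · have hn : (0 : Int) ≤ n := le_trans (mul_self_nonneg i) h
      have hin : i ≤ n := pv_le_of_sq_le n i h
      simp only [h, dite_true]
      apply ih (i + 1) _ _ (by omega)
      by_cases hd : PySem.Int.mod n i = 0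
      · simp only [hd, if_true]
        exact PySem.Set.nodup_add _ _ (PySem.Set.nodup_add _ _ hs)
      · simpa [hd] using hs
    · simpa [h] using hs

-- 'if my_list: for i in my_list: …' — the guard is redundant for a fold from ''
theorem pv_if_ne_nil (l : List Int) (f : String → Int → String) :
    (if l ≠ [] then l.foldl f "" else "") = l.foldl f "" := by
  by_cases h : l = [] <;> simp [h]

-- fold with a conditional append equals fold over the filtered list
theorem foldl_if_filter {α : Type} (p : α → Prop) [DecidablePred p] (g : String → α → String) :
    ∀ (l : List α) (acc : String),
      l.foldl (fun r d => if p d then g r d else r) acc = (l.filter (fun d => decide (p d))).foldl g acc := by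
  intro l
  induction l with
  | nil => intro acc; rfl
  | cons x xs ih =>
    intro acc
    by_cases hx : p x <;> simp [hx, ih]

-- the two divisor lists coincide (n ≥ 1)
theorem divisor_lists_eq (n : Int) (hn : 1 ≤ n) :
    (PySem.List.sorted (collectDivs n 1 PySem.Set.empty) (fun x => x) false).filter
        (fun d => decide (2 < d ∧ d < n)) =
      (PySem.List.pyRange 1 (n + 1) 1).filter
        (fun i => decide (PySem.Int.mod n i = 0 ∧ i > 2 ∧ i ≠ n)) := by
  set L := (PySem.List.pyRange 1 (n + 1) 1).filter
      (fun i => decide (PySem.Int.mod n i = 0 ∧ i > 2 ∧ i ≠ n)) with hL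
  set S := PySem.List.sorted (collectDivs n 1 PySem.Set.empty) (fun x => x) false with hS
  have hSnodup : S.Nodup := by
    have := nodup_collectDivs n (n + 1 - 1).toNat 1 PySem.Set.empty List.nodup_nil rfl
    exact (PySem.List.sorted_perm _ _ _).nodup_iff.mpr this
  have hSsorted : S.Pairwise (· < ·) := by
    have hle : S.Pairwise (fun a b => a ≤ b) := PySem.List.sorted_pairwise _ _
    have := List.Pairwise.and hle hSnodup
    exact this.imp (fun h => lt_of_le_of_ne h.1 h.2)
  have hfilterSorted : (S.filter (fun d => decide (2 < d ∧ d < n))).Pairwise (· < ·) :=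
    hSsorted.filter _
  have hLsorted : L.Pairwise (· < ·) :=
    (PySem.List.pairwise_lt_pyRange_one 1 (n + 1)).filter _
  have hmem : ∀ d, d ∈ S.filter (fun d => decide (2 < d ∧ d < n)) ↔ d ∈ L := by
    intro d
    simp only [List.mem_filter, hS, PySem.List.mem_sorted, hL, PySem.List.mem_pyRange_one,
      decide_eq_true_eq, mem_collectDivs_one n hn d]
    constructor
    · rintro ⟨⟨hdvd, h1, h2⟩, h3, h4⟩
      exact ⟨⟨h1, by omega⟩, (PySem.Int.mod_eq_zero_iff_dvd n d).mpr hdvd, h3, by omega⟩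
    · rintro ⟨⟨h1, h2⟩, hmod, h3, h4⟩
      have hdvd := (PySem.Int.mod_eq_zero_iff_dvd n d).mp hmod
      refine ⟨⟨hdvd, h1, by omega⟩, h3, ?_⟩
      omega
  have hperm : (S.filter (fun d => decide (2 < d ∧ d < n))).Perm L :=
    (List.perm_ext_iff_of_nodup (hSnodup.filter _)
      (((PySem.List.nodup_pyRange_one 1 (n + 1)).filter _))).mpr hmem
  exact List.Perm.eq_of_pairwise' hfilterSorted hLsorted hperm

-- ===== VERDICT (by name: the statement is the Claim_ definition above) =====
theorem oldQues_spec : Claim_equal_oldQues := by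
  intro n _
  unfold Spec_oldQues oldQues oldQues_alt
  dsimp only
  by_cases hn : n ≤ 0
  · have hrange : PySem.List.pyRange 1 (n + 1) 1 = [] :=
      PySem.List.pyRange_one_eq_nil (by omega)
    have hn' : ¬ n > 0 := by omega
    simp [hrange, hn']
  · have hn1 : 1 ≤ n := by omega
    have hn' : n > 0 := by omega
    have hA :
        (PySem.List.pyRange 1 (n + 1) 1).foldl
          (fun acc i => if PySem.Int.mod n i = 0 ∧ i > 2 ∧ i ≠ n then acc ++ [i] else acc) [] =
        (PySem.List.pyRange 1 (n + 1) 1).filter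
          (fun i => decide (PySem.Int.mod n i = 0 ∧ i > 2 ∧ i ≠ n)) := by
      simpa using PySem.List.foldl_append_ite_eq_filter
        (fun i => PySem.Int.mod n i = 0 ∧ i > 2 ∧ i ≠ n) (PySem.List.pyRange 1 (n + 1) 1) []
    have hB := foldl_if_filter (fun d => 2 < d ∧ d < n) (fun r d => r ++ unicNumber d)
      (PySem.List.sorted (collectDivs n 1 PySem.Set.empty) (fun x => x) false) ""
    rw [hA, pv_if_ne_nil, if_pos hn', hB, divisor_lists_eq n hn1]
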